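-- pv_equiv track=rewrite | github.com/dulongski/hackathon-america | modules/cluster_namer.py | _fallback_name
-- ===== SOURCE A (Python) =====
-- from typing import Tuple, List, FrozenSet
--
-- def _fallback_name(pos: str, feats_signed: List[str]) -> str:
--     lab = " ".join(feats_signed).lower()
--     def has(*terms: str) -> bool: return all(t in lab for t in terms)
--
--     if pos in ("Center Forward", "Right Wing", "Left Wing"):
--         if has("+xg_per90_rw") or has("+goals_per90_rw"):
--             return "Finisher"
--         if has("+xA_per90_rw") or "key_passes_per90_rw" in lab:
--             return "Creator Forward"
--         if has("+passes_att_per90_rw", "+passes_cmp_per90_rw"):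
--             return "Link-up Forward"
--         return "Utility Forward"
--
--     if pos == "Attacking Midfield":
--         if has("+xA_per90_rw") or "key_passes_per90_rw" in lab:
--             return "Creator 10"
--         return "Attacking Midfielder"
--
--     if pos == "Center Midfield":
--         if has("+obv_for_per90_rw") or has("+passes_att_per90_rw", "+passes_cmp_per90_rw"):
--             return "Progressor CM"
--         return "Holding CM"
--
--     if pos == "Defensive Midfield":
--         if has("+passes_att_per90_rw", "+passes_cmp_per90_rw") and "duels_won_per90_rw" in lab:
--             return "Balanced DM"
--         if "clearances_per90_rw" in lab:
--             return "Screening DM"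
--         return "Destroyer DM"
--
--     if pos in ("Right Back", "Left Back"):
--         if has("+xA_per90_rw") or "assists_per90_rw" in lab:
--             return "Attacking FB"
--         return "Defensive FB"
--
--     if pos == "Center Back":
--         if has("+key_passes_per90_rw") or has("+passes_att_per90_rw"):
--             return "Ball-playing CB"
--         if has("+xg_per90_rw") or "shots_per90_rw" in lab:
--             return "Set-piece Threat CB"
--         return "Stopper CB"
--
--     if pos == "Goalkeeper":
--         if has("+passes_att_per90_rw") or has("+passes_cmp_per90_rw"):
--             return "Sweeper-keeper"
--         return "Traditional GK"
--
--     return f"{pos} Archetype"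
-- ===== SOURCE B (Python) =====
-- from typing import List
--
-- # Static rules table: (positions, ordered [(OR-of-AND substring term groups, label)], default label).
-- _RULES = [
--     (["Center Forward", "Right Wing", "Left Wing"], [
--         ([["+xg_per90_rw"], ["+goals_per90_rw"]], "Finisher"),
--         ([["+xA_per90_rw"], ["key_passes_per90_rw"]], "Creator Forward"),
--         ([["+passes_att_per90_rw", "+passes_cmp_per90_rw"]], "Link-up Forward"),
--     ], "Utility Forward"),
--     (["Attacking Midfield"], [
--         ([["+xA_per90_rw"], ["key_passes_per90_rw"]], "Creator 10"),
--     ], "Attacking Midfielder"),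
--     (["Center Midfield"], [
--         ([["+obv_for_per90_rw"], ["+passes_att_per90_rw", "+passes_cmp_per90_rw"]], "Progressor CM"),
--     ], "Holding CM"),
--     (["Defensive Midfield"], [
--         ([["+passes_att_per90_rw", "+passes_cmp_per90_rw", "duels_won_per90_rw"]], "Balanced DM"),
--         ([["clearances_per90_rw"]], "Screening DM"),
--     ], "Destroyer DM"),
--     (["Right Back", "Left Back"], [
--         ([["+xA_per90_rw"], ["assists_per90_rw"]], "Attacking FB"),
--     ], "Defensive FB"),
--     (["Center Back"], [
--         ([["+key_passes_per90_rw"], ["+passes_att_per90_rw"]], "Ball-playing CB"),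
--         ([["+xg_per90_rw"], ["shots_per90_rw"]], "Set-piece Threat CB"),
--     ], "Stopper CB"),
--     (["Goalkeeper"], [
--         ([["+passes_att_per90_rw"], ["+passes_cmp_per90_rw"]], "Sweeper-keeper"),
--     ], "Traditional GK"),
-- ]
--
-- def _fallback_name(pos: str, feats_signed: List[str]) -> str:
--     lab = " ".join(feats_signed).lower()
--     for positions, rules, default in _RULES:
--         if pos in positions:
--             for disj, label in rules:
--                 if any(all(t in lab for t in conj) for conj in disj):
--                     return label
--             return default
--     return f"{pos} Archetype"
-- ===== Notes on version B (the rewrite author's own statement) =====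
-- stated objective: simpler
-- what changed: Replaces the hand-written if/elif cascade per position with a static data table (positions -> ordered OR-of-AND substring rules + default) driven by one generic first-match scan loop.
import Mathlib
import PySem

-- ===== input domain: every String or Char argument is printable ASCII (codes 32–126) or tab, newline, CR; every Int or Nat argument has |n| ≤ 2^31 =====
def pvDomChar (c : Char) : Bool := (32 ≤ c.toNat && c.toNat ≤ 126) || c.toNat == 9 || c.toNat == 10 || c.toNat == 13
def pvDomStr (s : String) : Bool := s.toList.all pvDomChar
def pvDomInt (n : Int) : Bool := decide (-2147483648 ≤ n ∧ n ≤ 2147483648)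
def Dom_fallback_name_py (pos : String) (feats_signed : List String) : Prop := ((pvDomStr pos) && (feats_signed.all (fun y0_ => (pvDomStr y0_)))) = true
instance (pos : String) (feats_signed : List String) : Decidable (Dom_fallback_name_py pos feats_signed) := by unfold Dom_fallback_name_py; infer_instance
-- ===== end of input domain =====

-- ===== PORT A =====
-- B restates A's if/elif cascade as a static rules table plus one generic first-match scan (objective: simpler).
-- pvHas lab ts = A's inner closure `has(*ts)`: every term is a substring of lab
def pvHas (lab : String) (terms : List String) : Bool :=
  terms.all (fun t => PySem.Str.isIn t lab)

def fallback_name_py (pos : String) (feats_signed : List String) : String :=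
  let lab := PySem.Str.lower (PySem.Str.join " " feats_signed)
  if pos ∈ (["Center Forward", "Right Wing", "Left Wing"] : List String) then
    if pvHas lab ["+xg_per90_rw"] || pvHas lab ["+goals_per90_rw"] then "Finisher"
    else if pvHas lab ["+xA_per90_rw"] || PySem.Str.isIn "key_passes_per90_rw" lab then "Creator Forward"
    else if pvHas lab ["+passes_att_per90_rw", "+passes_cmp_per90_rw"] then "Link-up Forward"
    else "Utility Forward"
  else if pos = "Attacking Midfield" then
    if pvHas lab ["+xA_per90_rw"] || PySem.Str.isIn "key_passes_per90_rw" lab then "Creator 10"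
    else "Attacking Midfielder"
  else if pos = "Center Midfield" then
    if pvHas lab ["+obv_for_per90_rw"] || pvHas lab ["+passes_att_per90_rw", "+passes_cmp_per90_rw"] then "Progressor CM"
    else "Holding CM"
  else if pos = "Defensive Midfield" then
    if pvHas lab ["+passes_att_per90_rw", "+passes_cmp_per90_rw"] && PySem.Str.isIn "duels_won_per90_rw" lab then "Balanced DM"
    else if PySem.Str.isIn "clearances_per90_rw" lab then "Screening DM"
    else "Destroyer DM"
  else if pos ∈ (["Right Back", "Left Back"] : List String) then
    if pvHas lab ["+xA_per90_rw"] || PySem.Str.isIn "assists_per90_rw" lab then "Attacking FB"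
    else "Defensive FB"
  else if pos = "Center Back" then
    if pvHas lab ["+key_passes_per90_rw"] || pvHas lab ["+passes_att_per90_rw"] then "Ball-playing CB"
    else if pvHas lab ["+xg_per90_rw"] || PySem.Str.isIn "shots_per90_rw" lab then "Set-piece Threat CB"
    else "Stopper CB"
  else if pos = "Goalkeeper" then
    if pvHas lab ["+passes_att_per90_rw"] || pvHas lab ["+passes_cmp_per90_rw"] then "Sweeper-keeper"
    else "Traditional GK"
  else pos ++ " Archetype"

-- ===== PORT B =====
-- The static table of Source B: (positions, ordered rules as OR-of-AND substring term groups with labels, default label)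
def pvRules : List (List String × List (List (List String) × String) × String) :=
  [ (["Center Forward", "Right Wing", "Left Wing"],
      [ ([["+xg_per90_rw"], ["+goals_per90_rw"]], "Finisher"),
        ([["+xA_per90_rw"], ["key_passes_per90_rw"]], "Creator Forward"),
        ([["+passes_att_per90_rw", "+passes_cmp_per90_rw"]], "Link-up Forward") ],
      "Utility Forward"),
    (["Attacking Midfield"],
      [ ([["+xA_per90_rw"], ["key_passes_per90_rw"]], "Creator 10") ],
      "Attacking Midfielder"),
    (["Center Midfield"],
      [ ([["+obv_for_per90_rw"], ["+passes_att_per90_rw", "+passes_cmp_per90_rw"]], "Progressor CM") ],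
      "Holding CM"),
    (["Defensive Midfield"],
      [ ([["+passes_att_per90_rw", "+passes_cmp_per90_rw", "duels_won_per90_rw"]], "Balanced DM"),
        ([["clearances_per90_rw"]], "Screening DM") ],
      "Destroyer DM"),
    (["Right Back", "Left Back"],
      [ ([["+xA_per90_rw"], ["assists_per90_rw"]], "Attacking FB") ],
      "Defensive FB"),
    (["Center Back"],
      [ ([["+key_passes_per90_rw"], ["+passes_att_per90_rw"]], "Ball-playing CB"),
        ([["+xg_per90_rw"], ["shots_per90_rw"]], "Set-piece Threat CB") ],
      "Stopper CB"),
    (["Goalkeeper"],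
      [ ([["+passes_att_per90_rw"], ["+passes_cmp_per90_rw"]], "Sweeper-keeper") ],
      "Traditional GK") ]

-- Source B's inner for-loop: first rule whose OR-of-ANDs matches, else the group's default
def pvFirstLabel (lab : String) (rules : List (List (List String) × String)) (dflt : String) : String :=
  match rules with
  | [] => dflt
  | (disj, label) :: rest =>
    if disj.any (fun conj => conj.all (fun t => PySem.Str.isIn t lab)) then label
    else pvFirstLabel lab rest dflt

-- Source B's outer for-loop over the table
def pvScanRules (pos lab : String)
    (table : List (List String × List (List (List String) × String) × String)) : String :=
  match table with
  | [] => pos ++ " Archetype"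
  | (positions, rules, dflt) :: rest =>
    if pos ∈ positions then pvFirstLabel lab rules dflt else pvScanRules pos lab rest

def fallback_name_py_alt (pos : String) (feats_signed : List String) : String :=
  pvScanRules pos (PySem.Str.lower (PySem.Str.join " " feats_signed)) pvRules

-- ===== PRECONDITION & SPEC =====
def Spec_fallback_name_py (pos : String) (feats_signed : List String) (out : String) : Prop := out = fallback_name_py_alt pos feats_signed
instance (pos : String) (feats_signed : List String) (out : String) : Decidable (Spec_fallback_name_py pos feats_signed out) := by unfold Spec_fallback_name_py; infer_instance

-- ===== CLAIM (what is proved, stated in full; the proofs are below) =====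
def Claim_equal_fallback_name_py : Prop := ∀ (pos : String) (feats_signed : List String), Dom_fallback_name_py pos feats_signed → Spec_fallback_name_py pos feats_signed (fallback_name_py pos feats_signed)

-- ===== LEMMAS AND PROOFS =====
theorem fallback_name_eq (pos : String) (feats_signed : List String) :
    fallback_name_py pos feats_signed = fallback_name_py_alt pos feats_signed := by
  unfold fallback_name_py fallback_name_py_alt
  generalize PySem.Str.lower (PySem.Str.join " " feats_signed) = lab
  simp only [pvRules, pvScanRules, pvFirstLabel, pvHas, List.any_cons, List.any_nil,
    List.all_cons, List.all_nil, Bool.or_false, Bool.and_true, List.mem_cons, List.not_mem_nil, or_false, Bool.and_assoc]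

-- ===== VERDICT (by name: the statement is the Claim_ definition above) =====
theorem fallback_name_py_spec : Claim_equal_fallback_name_py := by
  intro pos feats_signed _
  exact fallback_name_eq pos feats_signed
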